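-- pv_equiv track=rewrite | github.com/liteshperumalla/Powering-AI-Infrastructure-at-Scale | src/infra_mind/agents/ai_consultant_agent.py | _create_timeline_overview
-- ===== SOURCE A (Python) =====
-- from typing import Dict, Any, List, Optional
--
-- def _create_timeline_overview(phases: List[str]) -> Dict[str, str]:
--     """Create high-level timeline overview."""
--     timeline = {}
--     cumulative_months = 0
--
--     phase_durations = {
--         "Foundation Building": 3, "Pilot Projects": 4, "Scaling": 6,
--         "Quick Wins": 2, "Core Implementations": 5, "Advanced Applications": 6,
--         "Immediate Implementations": 3, "Strategic Initiatives": 5, "Innovation Labs": 4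
--     }
--
--     for phase in phases:
--         duration = phase_durations.get(phase, 4)
--         start_month = cumulative_months + 1
--         end_month = cumulative_months + duration
--         timeline[phase] = f"Months {start_month}-{end_month}"
--         cumulative_months += duration
--
--     return timeline
-- ===== SOURCE B (Python) =====
-- from typing import Dict, List
--
-- def _create_timeline_overview(phases: List[str]) -> Dict[str, str]:
--     """Create high-level timeline overview (built back-to-front from the grand total)."""
--     phase_durations = {
--         "Foundation Building": 3, "Pilot Projects": 4, "Scaling": 6,
--         "Quick Wins": 2, "Core Implementations": 5, "Advanced Applications": 6,
--         "Immediate Implementations": 3, "Strategic Initiatives": 5, "Innovation Labs": 4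
--     }
--     end = sum(phase_durations.get(p, 4) for p in phases)
--     entries = []
--     for phase in reversed(phases):
--         duration = phase_durations.get(phase, 4)
--         entries.append((phase, f"Months {end - duration + 1}-{end}"))
--         end -= duration
--     return dict(reversed(entries))
-- ===== Notes on version B (the rewrite author's own statement) =====
-- stated objective: alternative
-- what changed: B builds the timeline back-to-front: it first computes the grand total of months, then walks reversed(phases) subtracting each duration to emit entries from the end, and finally constructs the dict from the reversed entry list; A makes one forward pass carrying a running cumulative counter.
import Mathlib
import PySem

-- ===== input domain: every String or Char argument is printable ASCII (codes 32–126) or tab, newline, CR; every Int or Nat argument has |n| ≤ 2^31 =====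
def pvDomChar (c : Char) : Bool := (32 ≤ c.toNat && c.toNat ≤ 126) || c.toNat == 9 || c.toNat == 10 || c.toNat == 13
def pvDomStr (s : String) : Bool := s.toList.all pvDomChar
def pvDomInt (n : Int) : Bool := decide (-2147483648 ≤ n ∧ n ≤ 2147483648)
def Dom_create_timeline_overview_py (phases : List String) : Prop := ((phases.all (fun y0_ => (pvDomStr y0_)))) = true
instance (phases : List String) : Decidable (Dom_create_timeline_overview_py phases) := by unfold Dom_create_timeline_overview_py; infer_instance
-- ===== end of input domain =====

-- B builds the timeline back-to-front from the grand total instead of A's forward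
-- running-counter loop; objective: alternative decomposition, same cost.

-- the phase_durations literal both Python sources define verbatim
def pvPhaseDurations : PySem.Dict String Int :=
  PySem.Dict.ofList [("Foundation Building", 3), ("Pilot Projects", 4), ("Scaling", 6),
    ("Quick Wins", 2), ("Core Implementations", 5), ("Advanced Applications", 6),
    ("Immediate Implementations", 3), ("Strategic Initiatives", 5), ("Innovation Labs", 4)]

-- f"Months {s}-{e}"
def pvFmt (s e : Int) : String :=
  "Months " ++ PySem.Int.toStr s ++ "-" ++ PySem.Int.toStr e

-- ===== PORT A =====
def create_timeline_overview_py (phases : List String) : List (String × String) :=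
  (phases.foldl
    (fun (st : PySem.Dict String String × Int) phase =>
      let duration := pvPhaseDurations.getD phase 4
      let start_month := st.2 + 1
      let end_month := st.2 + duration
      (st.1.insert phase (pvFmt start_month end_month), st.2 + duration))
    (PySem.Dict.empty, 0)).1.items

-- ===== PORT B =====
def create_timeline_overview_py_alt (phases : List String) : List (String × String) :=
  -- end = sum(phase_durations.get(p, 4) for p in phases)
  let total := (phases.map (fun p => pvPhaseDurations.getD p 4)).sum
  -- for phase in reversed(phases): append entry, end -= duration
  let st := phases.reverse.foldl
    (fun (st : List (String × String) × Int) phase =>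
      let duration := pvPhaseDurations.getD phase 4
      (st.1 ++ [(phase, pvFmt (st.2 - duration + 1) st.2)], st.2 - duration))
    ([], total)
  -- dict(reversed(entries))
  (st.1.reverse.foldl (fun (d : PySem.Dict String String) pr => d.insert pr.1 pr.2)
    PySem.Dict.empty).items

-- ===== PRECONDITION & SPEC =====
def Spec_create_timeline_overview_py (phases : List String) (out : List (String × String)) : Prop := out = create_timeline_overview_py_alt phases
instance (phases : List String) (out : List (String × String)) : Decidable (Spec_create_timeline_overview_py phases out) := by unfold Spec_create_timeline_overview_py; infer_instance

-- ===== CLAIM (what is proved, stated in full; the proofs are below) =====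
def Claim_equal_create_timeline_overview_py : Prop := ∀ (phases : List String), Dom_create_timeline_overview_py phases → Spec_create_timeline_overview_py phases (create_timeline_overview_py phases)

-- ===== LEMMAS AND PROOFS =====

def pvDur (p : String) : Int := pvPhaseDurations.getD p 4

-- the sequence of (phase, label) pairs A's loop inserts, starting from running total cum
def pvPairs (cum : Int) : List String → List (String × String)
  | [] => []
  | p :: ps => (p, pvFmt (cum + 1) (cum + pvDur p)) :: pvPairs (cum + pvDur p) ps

lemma pvA_foldl (ps : List String) (d : PySem.Dict String String) (cum : Int) :
    (ps.foldl
      (fun (st : PySem.Dict String String × Int) phase =>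
        let duration := pvPhaseDurations.getD phase 4
        let start_month := st.2 + 1
        let end_month := st.2 + duration
        (st.1.insert phase (pvFmt start_month end_month), st.2 + duration))
      (d, cum)).1
    = (pvPairs cum ps).foldl (fun d pr => d.insert pr.1 pr.2) d := by
  induction ps generalizing d cum with
  | nil => rfl
  | cons p ps ih => simp [pvPairs, List.foldl, ih, pvDur]

-- B's reversed walk, phrased as foldr, produces A's pair sequence reversed
lemma pvB_foldr (ps : List String) (acc : List (String × String)) (cum : Int) :
    ps.foldr
      (fun phase (st : List (String × String) × Int) =>
        let duration := pvPhaseDurations.getD phase 4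
        (st.1 ++ [(phase, pvFmt (st.2 - duration + 1) st.2)], st.2 - duration))
      (acc, cum + (ps.map (fun p => pvPhaseDurations.getD p 4)).sum)
    = (acc ++ (pvPairs cum ps).reverse, cum) := by
  induction ps generalizing acc cum with
  | nil => simp [pvPairs]
  | cons p ps ih =>
    simp only [List.foldr, List.map_cons, List.sum_cons, pvPairs, List.reverse_cons]
    have h : cum + (pvPhaseDurations.getD p 4 + (ps.map (fun p => pvPhaseDurations.getD p 4)).sum)
        = (cum + pvDur p) + (ps.map (fun p => pvPhaseDurations.getD p 4)).sum := by
      simp only [pvDur]; ring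
    rw [h, ih]
    have h2 : cum + pvDur p - pvPhaseDurations.getD p 4 + 1 = cum + 1 := by
      simp only [pvDur]; ring
    have h3 : cum + pvDur p - pvPhaseDurations.getD p 4 = cum := by
      simp only [pvDur]; ring
    rw [h2, h3]
    simp

-- ===== VERDICT (by name: the statement is the Claim_ definition above) =====
theorem create_timeline_overview_py_spec : Claim_equal_create_timeline_overview_py := by
  intro phases _
  show create_timeline_overview_py phases = create_timeline_overview_py_alt phases
  unfold create_timeline_overview_py create_timeline_overview_py_alt
  rw [pvA_foldl]
  have hfold := pvB_foldr phases [] 0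
  rw [zero_add] at hfold
  simp only [List.foldl_reverse, hfold, List.nil_append, List.reverse_reverse]
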